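-- pv_equiv track=rewrite | github.com/jiaomayee/sudoku1012 | extract_expert_puzzles.py | process_puzzle_string
-- ===== SOURCE A (Python) =====
-- def process_puzzle_string(puzzle_str):
--     """处理谜题字符串，将'0'和'.'转换为0（表示空格），其他字符转换为整数"""
--     # 确保字符串长度为81，截取或填充
--     if len(puzzle_str) < 81:
--         puzzle_str = puzzle_str.ljust(81, '0')
--     elif len(puzzle_str) > 81:
--         puzzle_str = puzzle_str[:81]
--
--     # 转换为二维数组
--     puzzle = []
--     for i in range(9):
--         row = []
--         for j in range(9):
--             char = puzzle_str[i * 9 + j]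
--             # 将'0'和'.'转换为0，其他数字字符转换为整数
--             if char == '0' or char == '.':
--                 row.append(0)
--             elif char.isdigit():
--                 row.append(int(char))
--             else:
--                 # 对于非数字字符，默认设为0
--                 row.append(0)
--         puzzle.append(row)
--
--     return puzzle
-- ===== SOURCE B (Python) =====
-- DIGITS = '123456789'
--
--
-- def process_puzzle_string(puzzle_str):
--     # Value of a cell: position of the char in '123456789' plus one; absent
--     # (including '0', '.', junk, and missing tail chars) yields -1 + 1 = 0,
--     # so no ljust/truncate normalization and no classification branches needed.
--     def rows(s, n):
--         if n == 0:
--             return []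
--         chunk = s[:9]
--         row = [DIGITS.find(ch) + 1 for ch in chunk] + [0] * (9 - len(chunk))
--         return [row] + rows(s[9:], n - 1)
--     return rows(puzzle_str, 9)
-- ===== Notes on version B (the rewrite author's own statement) =====
-- stated objective: alternative
-- what changed: B drops A's ljust/truncate normalization and branch classification entirely: it recursively consumes the string nine characters at a time, and each cell value is '123456789'.find(c)+1, whose -1-for-absent result makes '0', '.', junk and missing padding all map to 0 arithmetically; short rows are completed with literal zeros.
import Mathlib
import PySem

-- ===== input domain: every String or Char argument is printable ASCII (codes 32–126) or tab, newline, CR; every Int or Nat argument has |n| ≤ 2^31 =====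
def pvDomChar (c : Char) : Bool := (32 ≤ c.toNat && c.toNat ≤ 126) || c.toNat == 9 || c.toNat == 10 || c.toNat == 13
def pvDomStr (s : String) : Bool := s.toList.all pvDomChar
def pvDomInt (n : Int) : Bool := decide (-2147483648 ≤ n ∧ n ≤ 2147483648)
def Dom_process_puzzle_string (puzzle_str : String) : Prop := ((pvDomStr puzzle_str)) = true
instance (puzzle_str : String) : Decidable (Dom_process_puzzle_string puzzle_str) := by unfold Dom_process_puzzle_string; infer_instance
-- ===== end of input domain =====

-- B replaces A's ljust/truncate normalization and branch classification with a recursive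
-- 9-chars-at-a-time consumption of the raw string, each cell being '123456789'.find(c)+1
-- (absent → 0), short rows completed with literal zeros (objective: alternative).

-- ===== PORT A =====
-- int(char) on the single ASCII digits that isdigit admits here is exactly code − 48.
def process_puzzle_string (puzzle_str : String) : List (List Int) :=
  let cs := puzzle_str.toList
  let ps := if cs.length < 81 then cs ++ List.replicate (81 - cs.length) '0'
            else if cs.length > 81 then cs.take 81 else cs
  (PySem.List.pyRange 0 9 1).foldl (fun puzzle i =>
    puzzle ++ [(PySem.List.pyRange 0 9 1).foldl (fun row j =>
      let c := PySem.List.pyGetD ps (i * 9 + j) ' '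
      row ++ [if c = '0' ∨ c = '.' then (0 : Int)
              else if PySem.Chars.isdigit c then ((c.toNat : Int) - 48)
              else 0]) []]) []

-- ===== PORT B =====
def pvDigits : List Char := "123456789".toList

-- DIGITS.find(ch) on the one-character string ch is PySem.Chars.find pvDigits [ch] (Str.find_eq).
def pvRows (s : List Char) : Nat → List (List Int)
  | 0 => []
  | Nat.succ n =>
      let chunk := PySem.List.slice s none (some 9)
      (chunk.map (fun ch => PySem.Chars.find pvDigits [ch] + 1)
        ++ List.replicate (9 - chunk.length) 0)
      :: pvRows (PySem.List.slice s (some 9) none) n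

def process_puzzle_string_alt (puzzle_str : String) : List (List Int) :=
  pvRows puzzle_str.toList 9

-- ===== PRECONDITION & SPEC =====
def Spec_process_puzzle_string (puzzle_str : String) (out : List (List Int)) : Prop := out = process_puzzle_string_alt puzzle_str
instance (puzzle_str : String) (out : List (List Int)) : Decidable (Spec_process_puzzle_string puzzle_str out) := by unfold Spec_process_puzzle_string; infer_instance

-- ===== CLAIM (what is proved, stated in full; the proofs are below) =====
def Claim_equal_process_puzzle_string : Prop := ∀ (puzzle_str : String), Dom_process_puzzle_string puzzle_str → Spec_process_puzzle_string puzzle_str (process_puzzle_string puzzle_str)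

-- ===== LEMMAS AND PROOFS =====

-- A's per-character classification
def pvClassifyA (c : Char) : Int :=
  if c = '0' ∨ c = '.' then 0
  else if PySem.Chars.isdigit c then ((c.toNat : Int) - 48)
  else 0

-- B's per-character value
def pvF (c : Char) : Int := PySem.Chars.find pvDigits [c] + 1

theorem pv_digit_cases (c : Char) (h : PySem.Chars.isdigit c = true) :
    c = '0' ∨ c = '1' ∨ c = '2' ∨ c = '3' ∨ c = '4' ∨ c = '5' ∨ c = '6' ∨ c = '7' ∨ c = '8' ∨ c = '9' := by
  simp [PySem.Chars.isdigit] at h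
  obtain ⟨h1, h2⟩ := h
  rw [Char.le_def, UInt32.le_iff_toNat_le] at h1 h2
  have e0 : ('0' : Char).val.toNat = 48 := by decide
  have e9 : ('9' : Char).val.toNat = 57 := by decide
  rw [e0] at h1; rw [e9] at h2
  have conv : ∀ d : Char, c.val.toNat = d.val.toNat → c = d :=
    fun d hh => Char.ext (UInt32.toNat_inj.mp hh)
  have hd : c.val.toNat = 48 ∨ c.val.toNat = 49 ∨ c.val.toNat = 50 ∨ c.val.toNat = 51 ∨
      c.val.toNat = 52 ∨ c.val.toNat = 53 ∨ c.val.toNat = 54 ∨ c.val.toNat = 55 ∨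
      c.val.toNat = 56 ∨ c.val.toNat = 57 := by omega
  rcases hd with h|h|h|h|h|h|h|h|h|h
  · have := conv '0' (by simp [h]); tauto
  · have := conv '1' (by simp [h]); tauto
  · have := conv '2' (by simp [h]); tauto
  · have := conv '3' (by simp [h]); tauto
  · have := conv '4' (by simp [h]); tauto
  · have := conv '5' (by simp [h]); tauto
  · have := conv '6' (by simp [h]); tauto
  · have := conv '7' (by simp [h]); tauto
  · have := conv '8' (by simp [h]); tauto
  · have := conv '9' (by simp [h]); tauto

-- the two classifications agree on every character
theorem pv_char (c : Char) : pvClassifyA c = pvF c := by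
  by_cases h0 : c = '0'
  · subst h0; decide
  by_cases hp : c = '.'
  · subst hp; decide
  by_cases hd : PySem.Chars.isdigit c = true
  · rcases pv_digit_cases c hd with rfl|rfl|rfl|rfl|rfl|rfl|rfl|rfl|rfl|rfl <;> decide
  · have h1 : c ≠ '1' := fun e => hd (by rw [e]; decide)
    have h2 : c ≠ '2' := fun e => hd (by rw [e]; decide)
    have h3 : c ≠ '3' := fun e => hd (by rw [e]; decide)
    have h4 : c ≠ '4' := fun e => hd (by rw [e]; decide)
    have h5 : c ≠ '5' := fun e => hd (by rw [e]; decide)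
    have h6 : c ≠ '6' := fun e => hd (by rw [e]; decide)
    have h7 : c ≠ '7' := fun e => hd (by rw [e]; decide)
    have h8 : c ≠ '8' := fun e => hd (by rw [e]; decide)
    have h9 : c ≠ '9' := fun e => hd (by rw [e]; decide)
    unfold pvClassifyA pvF pvDigits
    simp [h0, hp, hd, PySem.Chars.find, PySem.Chars.find.go, List.isPrefixOf, h1, h2, h3, h4, h5, h6, h7, h8, h9]

theorem pvF_zero : pvF '0' = 0 := by decide

-- B's chunk row equals the index form with default '0'
theorem pv_row_eq (l : List Char) :
    (l.take 9).map pvF ++ List.replicate (9 - (l.take 9).length) 0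
      = (List.range 9).map (fun j => pvF (l.getD j '0')) := by
  apply List.ext_getElem
  · simp [List.length_take]; try omega
  · intro i h1 h2
    have hi : i < 9 := by simpa using h2
    rw [List.getElem_append]
    split
    · next h =>
      have hlen : i < l.length := by simp only [List.length_map, List.length_take, lt_min_iff] at h; omega
      simp [List.getD_eq_getElem?_getD, List.getElem?_eq_getElem hlen, List.getElem_take]
    · next h =>
      have hlen : l.length ≤ i := by simp only [List.length_map, List.length_take, lt_min_iff] at h; omega
      rw [List.getElem_replicate]
      simp [List.getD_eq_getElem?_getD, List.getElem?_eq_none hlen, pvF_zero]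

-- B in map-of-maps form
theorem pv_B_eq (l : List Char) (n : Nat) :
    pvRows l n = (List.range n).map (fun k => (List.range 9).map (fun j =>
      pvF (l.getD (k * 9 + j) '0'))) := by
  induction n generalizing l with
  | zero => simp [pvRows]
  | succ n ih =>
    rw [pvRows, PySem.List.slice_to l (by norm_num), PySem.List.slice_from l (by norm_num)]
    rw [show ((9:Int)).toNat = 9 from rfl]
    rw [List.range_succ_eq_map (n := n), List.map_cons, List.map_map]
    congr 1
    · have := pv_row_eq l
      simpa using this
    · rw [ih (l.drop 9)]
      apply List.map_congr_left
      intro k hk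
      simp only [Function.comp]
      apply List.map_congr_left
      intro j hj
      congr 1
      rw [List.getD_eq_getElem?_getD, List.getD_eq_getElem?_getD, List.getElem?_drop]
      have hidx : 9 + (k * 9 + j) = Nat.succ k * 9 + j := by omega
      rw [hidx]

-- both normalizations produce the same 81-character list
theorem pv_norm_eq (cs : List Char) :
    (if cs.length < 81 then cs ++ List.replicate (81 - cs.length) '0'
     else if cs.length > 81 then cs.take 81 else cs)
    = cs.take 81 ++ List.replicate (81 - (cs.take 81).length) '0' := by
  rcases lt_or_ge cs.length 81 with h | h
  · simp [h, List.take_of_length_le (le_of_lt h)]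
  · have h1 : ¬ cs.length < 81 := not_lt.mpr h
    have h2 : (cs.take 81).length = 81 := by simp [List.length_take]; omega
    simp only [h1, if_false, h2]
    rcases eq_or_lt_of_le h with h3 | h3
    · have : ¬ cs.length > 81 := by omega
      simp [this, List.take_of_length_le (le_of_eq h3.symm)]
    · simp [h3]

-- A in map-of-maps form over the normalized list
theorem pv_A_eq (s : String) :
    process_puzzle_string s
      = (List.range 9).map (fun k => (List.range 9).map (fun j =>
          pvClassifyA ((s.toList.take 81 ++ List.replicate (81 - (s.toList.take 81).length) '0').getD (k * 9 + j) ' '))) := by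
  unfold process_puzzle_string
  simp only [PySem.List.foldl_append_singleton_eq_map, List.nil_append]
  rw [pv_norm_eq s.toList]
  set l := s.toList.take 81 ++ List.replicate (81 - (s.toList.take 81).length) '0' with hl
  rw [show (9 : Int) = ((9 : Nat) : Int) from rfl, PySem.List.pyRange_zero_natCast]
  rw [List.map_map]
  apply List.map_congr_left
  intro k hk
  simp only [Function.comp]
  rw [List.map_map]
  apply List.map_congr_left
  intro j hj
  simp only [Function.comp]
  have hc : ((k : Nat) : Int) * ((9 : Nat) : Int) + ((j : Nat) : Int) = ((k * 9 + j : Nat) : Int) := by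
    push_cast; ring
  rw [hc, PySem.List.pyGetD_natCast]
  rfl

-- the two index forms agree at every in-range cell
theorem pv_cell (cs : List Char) (idx : Nat) (h : idx < 81) :
    pvClassifyA ((cs.take 81 ++ List.replicate (81 - (cs.take 81).length) '0').getD idx ' ')
      = pvF (cs.getD idx '0') := by
  by_cases hlen : idx < cs.length
  · have ht : idx < (cs.take 81).length := by simp [List.length_take]; omega
    rw [List.getD_eq_getElem?_getD, List.getElem?_append_left ht,
        List.getElem?_eq_getElem ht, List.getElem_take,
        List.getD_eq_getElem?_getD, List.getElem?_eq_getElem hlen]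
    exact pv_char _
  · have hlen' : cs.length ≤ idx := Nat.le_of_not_lt hlen
    have ht : (cs.take 81).length = cs.length := by simp [List.length_take]; omega
    rw [List.getD_eq_getElem?_getD, List.getElem?_append_right (by rw [ht]; exact hlen'), ht,
        List.getElem?_replicate]
    have hr : idx - cs.length < 81 - cs.length := by omega
    rw [if_pos hr]
    rw [List.getD_eq_getElem?_getD, List.getElem?_eq_none (by omega)]
    exact pv_char '0'

-- ===== VERDICT =====
theorem process_puzzle_string_spec : Claim_equal_process_puzzle_string := by
  intro s _
  unfold Spec_process_puzzle_string
  rw [pv_A_eq, show process_puzzle_string_alt s = pvRows s.toList 9 from rfl, pv_B_eq]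
  apply List.map_congr_left
  intro k hk
  apply List.map_congr_left
  intro j hj
  exact pv_cell s.toList (k * 9 + j)
    (by have := List.mem_range.mp hk; have := List.mem_range.mp hj; omega)
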